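-- pv_equiv track=rewrite | github.com/cchauve/SCJ-TD-FD | DSCJ_smd.py | reduceGenome
-- ===== SOURCE A (Python) =====
-- def reduceGenome(D):
-- 	TD_from_arrays = 0														#Maintain a count of TD from arrays.
-- 	for chromosome in D:
-- 		for gene_idx in range(len(chromosome)):
-- 			while gene_idx < len(chromosome) - 1:
-- 				if chromosome[gene_idx] == chromosome[gene_idx + 1]:		#Remove tandem arrays, if any.
-- 					del chromosome[gene_idx]
-- 					TD_from_arrays += 1
-- 				else:
-- 					gene_idx += 1
-- 	return (D, TD_from_arrays)
-- ===== SOURCE B (Python) =====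
-- def reduceGenome(D):
-- 	removed = 0
-- 	for chromosome in D:
-- 		out = []
-- 		for g in chromosome:
-- 			if out and out[-1] == g:
-- 				removed += 1
-- 			else:
-- 				out.append(g)
-- 		chromosome[:] = out												#Same in-place mutation as A.
-- 	return (D, removed)
-- ===== Notes on version B (the rewrite author's own statement) =====
-- stated objective: faster
-- what changed: Replaces the per-chromosome index/while loop with repeated O(n) del calls (and a redundant outer range pass) by a single forward pass that appends a gene only if it differs from the previous kept gene.
import Mathlib
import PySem

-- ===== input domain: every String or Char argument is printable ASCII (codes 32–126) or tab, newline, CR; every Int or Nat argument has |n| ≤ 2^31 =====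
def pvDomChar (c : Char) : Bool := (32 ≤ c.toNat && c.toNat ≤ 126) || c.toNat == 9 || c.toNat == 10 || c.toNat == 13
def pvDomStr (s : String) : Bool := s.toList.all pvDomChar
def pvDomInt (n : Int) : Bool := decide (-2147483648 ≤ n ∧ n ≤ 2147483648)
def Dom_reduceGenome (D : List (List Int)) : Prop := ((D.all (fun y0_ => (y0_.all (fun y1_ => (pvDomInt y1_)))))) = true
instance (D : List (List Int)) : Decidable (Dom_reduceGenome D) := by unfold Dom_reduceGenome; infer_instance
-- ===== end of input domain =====

-- B collapses adjacent duplicates in one forward pass instead of A's index/while loop with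
-- repeated `del`; A mutates the chromosomes in place, B rebuilds them — the equivalence proved
-- here is about the RETURN value (Source B performs the same in-place mutation).

-- ===== PORT A =====
-- inner `while gene_idx < len(chromosome)-1: …` loop; indexing is always in range
-- (the guard gives gene_idx+1 ≤ len-1), so `getD _ 0` is exact here.
def aWhile (c : List Int) (i : Nat) (cnt : Int) : List Int × Int :=
  if h : i < c.length - 1 then
    if c.getD i 0 = c.getD (i+1) 0 then
      aWhile (c.eraseIdx i) i (cnt + 1)            -- del chromosome[gene_idx]; TD_from_arrays += 1
    else
      aWhile c (i+1) cnt                           -- gene_idx += 1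
  else (c, cnt)
termination_by c.length - i
decreasing_by
  · have : i < c.length := by omega
    simp [List.length_eraseIdx, this]; omega
  · omega

-- `for gene_idx in range(len(chromosome))`: range over the ORIGINAL length, state = (chromosome, count)
def aChrom (c : List Int) (cnt : Int) : List Int × Int :=
  (List.range c.length).foldl (fun s i => aWhile s.1 i s.2) (c, cnt)

def reduceGenome (D : List (List Int)) : List (List Int) × Int :=
  D.foldl (fun (acc : List (List Int) × Int) c =>
    let p := aChrom c acc.2
    (acc.1 ++ [p.1], p.2)) ([], 0)

-- ===== PORT B =====
-- `if out and out[-1] == g` is exactly `out.getLast? = some g`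
def bGene (s : List Int × Int) (g : Int) : List Int × Int :=
  if s.1.getLast? = some g then (s.1, s.2 + 1) else (s.1 ++ [g], s.2)

def bChrom (c : List Int) (cnt : Int) : List Int × Int :=
  c.foldl bGene ([], cnt)

def reduceGenome_alt (D : List (List Int)) : List (List Int) × Int :=
  D.foldl (fun (acc : List (List Int) × Int) c =>
    let p := bChrom c acc.2
    (acc.1 ++ [p.1], p.2)) ([], 0)

-- ===== PRECONDITION & SPEC =====
def Spec_reduceGenome (D : List (List Int)) (out : List (List Int) × Int) : Prop := out = reduceGenome_alt D
instance (D : List (List Int)) (out : List (List Int) × Int) : Decidable (Spec_reduceGenome D out) := by unfold Spec_reduceGenome; infer_instance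

-- ===== CLAIM (what is proved, stated in full; the proofs are below) =====
def Claim_equal_reduceGenome : Prop := ∀ (D : List (List Int)), Dom_reduceGenome D → Spec_reduceGenome D (reduceGenome D)

-- ===== LEMMAS AND PROOFS =====

-- adjacent-duplicate compaction with removal count, parametrised by the previous kept gene
def compactFrom : Option Int → List Int → List Int × Int
  | _, [] => ([], 0)
  | prev, g :: t =>
    if prev = some g then
      let p := compactFrom prev t; (p.1, p.2 + 1)
    else
      let p := compactFrom (some g) t; (g :: p.1, p.2)

theorem compactFrom_none_cons (a : Int) (t : List Int) :
    compactFrom none (a :: t) = (a :: (compactFrom (some a) t).1, (compactFrom (some a) t).2) := by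
  simp [compactFrom]

theorem compactFrom_none_dup (a : Int) (t : List Int) :
    compactFrom none (a :: a :: t) = ((compactFrom none (a :: t)).1, (compactFrom none (a :: t)).2 + 1) := by
  simp [compactFrom]

theorem compactFrom_none_ne (a b : Int) (t : List Int) (h : a ≠ b) :
    compactFrom none (a :: b :: t) = (a :: (compactFrom none (b :: t)).1, (compactFrom none (b :: t)).2) := by
  simp [compactFrom, h]

-- ---- B side: the fold computes compactFrom ----
theorem bChrom_foldl (c : List Int) : ∀ (out : List Int) (cnt : Int),
    c.foldl bGene (out, cnt)
      = (out ++ (compactFrom out.getLast? c).1, cnt + (compactFrom out.getLast? c).2) := by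
  induction c with
  | nil => intro out cnt; simp [compactFrom]
  | cons g t ih =>
    intro out cnt
    by_cases h : out.getLast? = some g
    · simp only [List.foldl_cons, bGene, h, ih, compactFrom]
      simp [h]; ring
    · simp only [List.foldl_cons, bGene, if_neg h, ih, List.getLast?_concat, compactFrom]
      simp [List.append_assoc]

theorem bChrom_eq (c : List Int) (cnt : Int) :
    bChrom c cnt = ((compactFrom none c).1, cnt + (compactFrom none c).2) := by
  simpa using bChrom_foldl c [] cnt

-- ---- A side: the while loop from index p.length compacts the suffix ----
theorem aWhile_split (s : List Int) : ∀ (p : List Int) (cnt : Int),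
    aWhile (p ++ s) p.length cnt
      = (p ++ (compactFrom none s).1, cnt + (compactFrom none s).2) := by
  induction s with
  | nil => intro p cnt; rw [aWhile]; simp [compactFrom]
  | cons a s' ih =>
    intro p cnt
    cases s' with
    | nil =>
      rw [aWhile]; simp [compactFrom]
    | cons b t =>
      rw [aWhile]
      have hlt : p.length < (p ++ a :: b :: t).length - 1 := by
        simp only [List.length_append, List.length_cons]; omega
      have hga : (p ++ a :: b :: t).getD p.length 0 = a := by
        simp [List.getD]
      have hgb : (p ++ a :: b :: t).getD (p.length + 1) 0 = b := by
        simp [List.getD]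
      rw [dif_pos hlt, hga, hgb]
      by_cases hab : a = b
      · subst hab
        rw [if_pos rfl]
        have he : (p ++ a :: a :: t).eraseIdx p.length = p ++ a :: t := by
          rw [List.eraseIdx_append_of_length_le (le_refl _)]; simp
        rw [he, ih p (cnt + 1), compactFrom_none_dup]
        simp [Prod.ext_iff]; ring
      · rw [if_neg hab]
        have hp : p ++ a :: b :: t = (p ++ [a]) ++ (b :: t) := by simp
        have hl : p.length + 1 = (p ++ [a]).length := by simp
        rw [hp, hl, ih (p ++ [a]) cnt, compactFrom_none_ne a b t hab]
        simp

-- ---- compaction output has no adjacent duplicates, and is a fixpoint ----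
theorem isChain_compactFrom (t : List Int) : ∀ (a : Int),
    List.IsChain (· ≠ ·) (a :: (compactFrom (some a) t).1) := by
  induction t with
  | nil => intro a; simp [compactFrom]
  | cons g t' ih =>
    intro a
    by_cases h : a = g
    · simpa [compactFrom, h] using ih g
    · simp only [compactFrom, Option.some.injEq, if_neg h]
      exact List.isChain_cons_cons.mpr ⟨h, ih g⟩

theorem isChain_compactFrom_none (s : List Int) :
    List.IsChain (· ≠ ·) (compactFrom none s).1 := by
  cases s with
  | nil => simp [compactFrom]
  | cons a t => rw [compactFrom_none_cons]; exact isChain_compactFrom t a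

theorem compactFrom_some_of_isChain (t : List Int) : ∀ (a : Int),
    List.IsChain (· ≠ ·) (a :: t) → compactFrom (some a) t = (t, 0) := by
  induction t with
  | nil => intro a _; simp [compactFrom]
  | cons g t' ih =>
    intro a h
    obtain ⟨hag, hgt⟩ := List.isChain_cons_cons.mp h
    simp [compactFrom, hag, ih g hgt]

theorem compactFrom_none_of_isChain (s : List Int) (h : List.IsChain (· ≠ ·) s) :
    compactFrom none s = (s, 0) := by
  cases s with
  | nil => rfl
  | cons a t => rw [compactFrom_none_cons, compactFrom_some_of_isChain t a h]

-- ---- the while loop is a no-op on an already compacted chromosome ----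
theorem aWhile_noop (d : List Int) (h : List.IsChain (· ≠ ·) d) (i : Nat) (cnt : Int) :
    aWhile d i cnt = (d, cnt) := by
  by_cases hi : i ≤ d.length
  · have hd : d = d.take i ++ d.drop i := (List.take_append_drop i d).symm
    have hl : (d.take i).length = i := List.length_take_of_le hi
    calc aWhile d i cnt = aWhile (d.take i ++ d.drop i) (d.take i).length cnt := by rw [← hd, hl]
      _ = (d.take i ++ (compactFrom none (d.drop i)).1, cnt + (compactFrom none (d.drop i)).2) :=
          aWhile_split (d.drop i) (d.take i) cnt
      _ = (d, cnt) := by rw [compactFrom_none_of_isChain _ (h.drop i)]; simp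
  · rw [aWhile]
    have : ¬ i < d.length - 1 := by omega
    rw [dif_neg this]

theorem foldl_aWhile_noop (l : List Nat) (d : List Int) (cnt : Int)
    (h : List.IsChain (· ≠ ·) d) :
    l.foldl (fun (s : List Int × Int) i => aWhile s.1 i s.2) (d, cnt) = (d, cnt) := by
  induction l with
  | nil => rfl
  | cons i l' ih => simp [aWhile_noop d h i cnt, ih]

-- ---- per-chromosome agreement ----
theorem aChrom_eq_bChrom (c : List Int) (cnt : Int) : aChrom c cnt = bChrom c cnt := by
  rw [bChrom_eq]
  cases hc : c with
  | nil => simp [aChrom, compactFrom]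
  | cons a t =>
    unfold aChrom
    rw [← hc]
    have hn : c.length = t.length + 1 := by rw [hc]; rfl
    rw [hn, List.range_succ_eq_map, List.foldl_cons]
    have h0 : aWhile c 0 cnt = ((compactFrom none c).1, cnt + (compactFrom none c).2) := by
      simpa using aWhile_split c [] cnt
    rw [h0]
    exact foldl_aWhile_noop _ _ _ (isChain_compactFrom_none c)

-- ===== VERDICT (by name: the statement is the Claim_ definition above) =====
theorem reduceGenome_spec : Claim_equal_reduceGenome := by
  intro D _
  unfold Spec_reduceGenome reduceGenome reduceGenome_alt
  have hstep : (fun (acc : List (List Int) × Int) c =>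
        let p := aChrom c acc.2; (acc.1 ++ [p.1], p.2))
      = (fun (acc : List (List Int) × Int) c =>
        let p := bChrom c acc.2; (acc.1 ++ [p.1], p.2)) := by
    funext acc c; simp [aChrom_eq_bChrom]
  rw [hstep]
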